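-- pv_equiv track=rewrite | github.com/gfhgx-rmonn/rich_beluga | userbot_features.py | _gradient_line
-- ===== SOURCE A (Python) =====
-- R  = "\033[0m";  B  = "\033[1m";  CY = "\033[96m"
--
-- def _gradient_line(line: str, col_a: str, col_b: str) -> str:
--     """Красит строку градиентом от col_a к col_b посимвольно."""
--     n = len(line)
--     if n == 0:
--         return line
--     out = ""
--     for i, ch in enumerate(line):
--         # Чередуем цвета по позиции — создаёт плавный визуальный переход
--         color = col_a if (i * 2 // max(n, 1)) % 2 == 0 else col_b
--         out += f"{color}{ch}{R}"
--     return out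
-- ===== SOURCE B (Python) =====
-- R = "\033[0m"
--
-- def _gradient_line(line: str, col_a: str, col_b: str) -> str:
--     mid = (len(line) + 1) // 2
--     pre = "".join(f"{col_a}{ch}{R}" for ch in line[:mid])
--     suf = "".join(f"{col_b}{ch}{R}" for ch in line[mid:])
--     return pre + suf
-- ===== Notes on version B (the rewrite author's own statement) =====
-- stated objective: simpler
-- what changed: Replaces the per-character index formula (i*2//n)%2 inside an enumerate loop by a midpoint split: the first ceil(n/2) characters are colored with col_a and the rest with col_b, each half built directly by a join over a slice.
import Mathlib
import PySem

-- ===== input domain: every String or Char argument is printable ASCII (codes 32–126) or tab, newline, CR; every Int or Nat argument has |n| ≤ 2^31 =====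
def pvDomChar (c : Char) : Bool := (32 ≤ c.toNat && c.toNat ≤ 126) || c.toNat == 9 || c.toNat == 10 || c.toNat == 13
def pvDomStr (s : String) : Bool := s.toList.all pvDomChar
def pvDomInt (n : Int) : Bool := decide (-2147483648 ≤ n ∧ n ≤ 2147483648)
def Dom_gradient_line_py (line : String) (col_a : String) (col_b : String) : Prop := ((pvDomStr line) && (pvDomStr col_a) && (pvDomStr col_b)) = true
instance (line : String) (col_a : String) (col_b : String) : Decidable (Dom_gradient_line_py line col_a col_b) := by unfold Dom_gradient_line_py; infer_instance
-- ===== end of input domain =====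

-- B replaces A's per-character index formula (i*2//n)%2 with a midpoint split of the
-- line, coloring each half directly (objective: simpler; return value only, no mutation).

-- ===== PORT A =====
-- A: early return on empty, then an enumerate loop appending f"{color}{ch}{R}" where
-- color = col_a if (i*2 // max(n,1)) % 2 == 0 else col_b.  Strings are ported as List Char
-- (exact: Python string concatenation = list append on the character lists).
def gradient_line_py (line : String) (col_a : String) (col_b : String) : String :=
  let n : Int := PySem.Str.len line
  if n = 0 then line
  else
    String.ofList ((PySem.List.enumerate line.toList 0).foldl
      (fun out p =>
        out ++ (if PySem.Int.mod (PySem.Int.floordiv (p.1 * 2) (max n 1)) 2 == 0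
                then col_a.toList else col_b.toList) ++ [p.2] ++ "\x1b[0m".toList)
      [])

-- ===== PORT B =====
-- B: mid = (len(line)+1)//2; color line[:mid] with col_a and line[mid:] with col_b.
-- "".join over the generator = flatMap (exact).
def gradient_line_py_alt (line : String) (col_a : String) (col_b : String) : String :=
  let cs := line.toList
  let mid : Int := PySem.Int.floordiv (PySem.Str.len line + 1) 2
  let pre := (PySem.List.slice cs none (some mid)).flatMap
      (fun ch => col_a.toList ++ [ch] ++ "\x1b[0m".toList)
  let suf := (PySem.List.slice cs (some mid) none).flatMap
      (fun ch => col_b.toList ++ [ch] ++ "\x1b[0m".toList)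
  String.ofList (pre ++ suf)

-- ===== PRECONDITION & SPEC =====
def Spec_gradient_line_py (line : String) (col_a : String) (col_b : String) (out : String) : Prop := out = gradient_line_py_alt line col_a col_b
instance (line : String) (col_a : String) (col_b : String) (out : String) : Decidable (Spec_gradient_line_py line col_a col_b out) := by unfold Spec_gradient_line_py; infer_instance

-- ===== CLAIM (what is proved, stated in full; the proofs are below) =====
def Claim_equal_gradient_line_py : Prop := ∀ (line : String) (col_a : String) (col_b : String), Dom_gradient_line_py line col_a col_b → Spec_gradient_line_py line col_a col_b (gradient_line_py line col_a col_b)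

-- ===== LEMMAS AND PROOFS =====

-- A's colored-append over an enumerate segment on which the color condition is constant.
theorem pv_enum_const_true (cs : List Char) (s : Int) (cond : Int → Bool) (A B r : List Char)
    (h : ∀ i, s ≤ i → i < s + cs.length → cond i = true) :
    (PySem.List.enumerate cs s).flatMap (fun p => (if cond p.1 then A else B) ++ ([p.2] ++ r))
      = cs.flatMap (fun ch => A ++ ([ch] ++ r)) := by
  induction cs generalizing s with
  | nil => simp [PySem.List.enumerate_nil]
  | cons c cs ih =>
    rw [PySem.List.enumerate_cons]
    simp only [List.flatMap_cons]
    rw [h s le_rfl (by simp only [List.length_cons]; omega), if_pos rfl,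
        ih (s + 1) (fun i hi1 hi2 => h i (by omega)
          (by simp only [List.length_cons] at hi2 ⊢; push_cast at hi2 ⊢; omega))]

theorem pv_enum_const_false (cs : List Char) (s : Int) (cond : Int → Bool) (A B r : List Char)
    (h : ∀ i, s ≤ i → i < s + cs.length → cond i = false) :
    (PySem.List.enumerate cs s).flatMap (fun p => (if cond p.1 then A else B) ++ ([p.2] ++ r))
      = cs.flatMap (fun ch => B ++ ([ch] ++ r)) := by
  induction cs generalizing s with
  | nil => simp [PySem.List.enumerate_nil]
  | cons c cs ih =>
    rw [PySem.List.enumerate_cons]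
    simp only [List.flatMap_cons]
    rw [h s le_rfl (by simp only [List.length_cons]; omega)]
    simp only [Bool.false_eq_true, if_false]
    rw [ih (s + 1) (fun i hi1 hi2 => h i (by omega)
          (by simp only [List.length_cons] at hi2 ⊢; push_cast at hi2 ⊢; omega))]

theorem pv_cond_true (n i : Int) (hn : 0 < n) (hi : 0 ≤ i) (h2 : 2 * i < n) :
    (PySem.Int.mod (PySem.Int.floordiv (i * 2) (max n 1)) 2 == 0) = true := by
  have hmax : max n 1 = n := by omega
  rw [hmax]
  have : PySem.Int.floordiv (i * 2) n = 0 := by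
    rw [PySem.Int.floordiv_eq_iff_of_pos hn]; constructor <;> omega
  simp [this, PySem.Int.mod]

theorem pv_cond_false (n i : Int) (hn : 0 < n) (h1 : n ≤ 2 * i) (h2 : i < n) :
    (PySem.Int.mod (PySem.Int.floordiv (i * 2) (max n 1)) 2 == 0) = false := by
  have hmax : max n 1 = n := by omega
  rw [hmax]
  have : PySem.Int.floordiv (i * 2) n = 1 := by
    rw [PySem.Int.floordiv_eq_iff_of_pos hn]; constructor <;> omega
  simp [this, PySem.Int.mod]

-- ===== VERDICT (by name: the statement is the Claim_ definition above) =====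
theorem gradient_line_py_spec : Claim_equal_gradient_line_py := by
  intro line col_a col_b _
  unfold Spec_gradient_line_py gradient_line_py gradient_line_py_alt
  simp only [PySem.Str.len_eq]
  by_cases h0 : ((line.toList.length : Int) = 0)
  · have hnil : line.toList = [] := List.length_eq_zero_iff.mp (by exact_mod_cast h0)
    rw [if_pos h0, hnil]
    simp only [PySem.List.slice]
    calc line = String.ofList line.toList := String.ofList_toList.symm
      _ = _ := by rw [hnil]; rfl
  · rw [if_neg h0]
    have hn : 0 < (line.toList.length : Int) := by omega
    set m : Nat := (line.toList.length + 1) / 2 with hm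
    have hmid : PySem.Int.floordiv ((line.toList.length : Int) + 1) 2 = (m : Int) := by
      rw [PySem.Int.floordiv_eq_iff_of_pos (by omega)]
      constructor <;> omega
    rw [hmid, PySem.List.slice_to_natCast, PySem.List.slice_from_natCast]
    have hmle : m ≤ line.toList.length := by omega
    -- A's fold is a flatMap
    simp only [List.append_assoc]
    rw [← List.flatMap_eq_foldl]
    -- split the enumerate at the midpoint
    rw [show PySem.List.enumerate line.toList
          = PySem.List.enumerate (line.toList.take m ++ line.toList.drop m) from by
        rw [List.take_append_drop],
      PySem.List.enumerate_append, List.flatMap_append]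
    have hlt : (line.toList.take m).length = m := List.length_take_of_le hmle
    rw [hlt, zero_add]
    refine congrArg String.ofList (congrArg₂ (· ++ ·) ?_ ?_)
    · refine pv_enum_const_true _ 0
        (fun i => PySem.Int.mod (PySem.Int.floordiv (i * 2) (max ((line.toList.length : Int)) 1)) 2 == 0)
        col_a.toList col_b.toList _ ?_
      intro i hi1 hi2
      rw [zero_add] at hi2
      rw [hlt] at hi2
      exact pv_cond_true (line.toList.length : Int) i hn hi1 (by omega)
    · refine pv_enum_const_false _ (m : Int)
        (fun i => PySem.Int.mod (PySem.Int.floordiv (i * 2) (max ((line.toList.length : Int)) 1)) 2 == 0)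
        col_a.toList col_b.toList _ ?_
      intro i hi1 hi2
      rw [List.length_drop] at hi2
      exact pv_cond_false (line.toList.length : Int) i hn (by omega) (by omega)
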